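-- pv_equiv track=rewrite | github.com/xdc7/pythonworkout | chapter-01/02-extra-01-sum.py | mysum
-- ===== SOURCE A (Python) =====
-- def mysum(numberList=[],startingPoint=0):
--     """ Implements a simple sum function with an optional starting point. Note that the function takes a list as the first parameter"""
--     if len(numberList) == 0:
--         return 0
--     result = 0
--     for num in numberList:
--         if (not isinstance(num, int)):
--             return ValueError
--         result += num
--     return result
-- ===== SOURCE B (Python) =====
-- def mysum(numberList=[], startingPoint=0):
--     """Sum of the list via the standard library; startingPoint is ignored, exactly as in A."""
--     if not all(isinstance(n, int) for n in numberList):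
--         return ValueError
--     return sum(numberList)
-- ===== Notes on version B (the rewrite author's own statement) =====
-- stated objective: idiomatic
-- what changed: Replaces the manual accumulator loop with a whole-list all() validation pass followed by the builtin sum()
import Mathlib
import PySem

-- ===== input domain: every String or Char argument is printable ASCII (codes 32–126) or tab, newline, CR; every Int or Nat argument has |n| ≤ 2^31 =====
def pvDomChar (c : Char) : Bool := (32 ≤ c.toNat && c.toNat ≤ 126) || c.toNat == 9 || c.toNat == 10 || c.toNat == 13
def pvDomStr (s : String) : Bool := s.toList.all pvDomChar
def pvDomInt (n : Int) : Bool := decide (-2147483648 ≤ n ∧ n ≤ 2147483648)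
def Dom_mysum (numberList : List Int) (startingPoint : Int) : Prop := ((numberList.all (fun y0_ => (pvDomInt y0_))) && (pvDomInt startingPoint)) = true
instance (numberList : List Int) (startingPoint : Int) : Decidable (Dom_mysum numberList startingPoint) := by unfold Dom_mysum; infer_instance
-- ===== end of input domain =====

-- B sums with the standard library (validation pass + sum) instead of A's manual accumulator loop; startingPoint is ignored by both, as in A.
-- On List Int every element is an int, so A's isinstance/ValueError branch never fires and both programs return an Int.

-- ===== PORT A =====
-- A: early return on a length-0 list, else a left fold accumulating result += num
-- (the isinstance branch is unreachable on List Int and is therefore not represented).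
def mysum (numberList : List Int) (startingPoint : Int) : Int :=
  if numberList.length = 0 then 0
  else numberList.foldl (fun result num => result + num) 0

-- ===== PORT B =====
-- B: all-ints validation is vacuous on List Int; sum(numberList) is List.sum.
def mysum_alt (numberList : List Int) (startingPoint : Int) : Int :=
  numberList.sum

-- ===== PRECONDITION & SPEC =====
def Spec_mysum (numberList : List Int) (startingPoint : Int) (out : Int) : Prop := out = mysum_alt numberList startingPoint
instance (numberList : List Int) (startingPoint : Int) (out : Int) : Decidable (Spec_mysum numberList startingPoint out) := by unfold Spec_mysum; infer_instance

-- ===== CLAIM (what is proved, stated in full; the proofs are below) =====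
def Claim_equal_mysum : Prop := ∀ (numberList : List Int) (startingPoint : Int), Dom_mysum numberList startingPoint → Spec_mysum numberList startingPoint (mysum numberList startingPoint)

-- ===== LEMMAS AND PROOFS =====
theorem pv_foldl_add_sum (l : List Int) : l.foldl (fun result num => result + num) 0 = l.sum := by
  induction l using List.reverseRecOn with
  | nil => rfl
  | append_singleton xs x ih => simp [List.foldl_append, ih]

-- ===== VERDICT (by name: the statement is the Claim_ definition above) =====
theorem mysum_spec : Claim_equal_mysum := by
  intro l s _
  unfold Spec_mysum mysum mysum_alt
  split
  · next h => simp [List.length_eq_zero_iff.mp h]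
  · exact pv_foldl_add_sum l
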